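-- pv_equiv track=rewrite | github.com/MrBrantCode/unitest_baseline | mut_generate/mist_train_cf/cf_87751/solution.py | generate_square_primes
-- ===== SOURCE A (Python) =====
-- import math
--
-- def generate_square_primes(n):
--     primes = [True] * (n + 1)
--     primes[0] = primes[1] = False
--
--     for i in range(2, int(math.sqrt(n)) + 1):
--         if primes[i]:
--             for j in range(i * i, n + 1, i):
--                 primes[j] = False
--
--     square_primes = []
--     for i in range(2, n + 1):
--         if primes[i] and i % 3 != 0:
--             square_primes.append(i ** 2)
--
--     return square_primes
-- ===== SOURCE B (Python) =====
-- def generate_square_primes(n):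
--     # Per-number trial division instead of a sieve table.
--     def is_prime(i):
--         d = 2
--         while d * d <= i:
--             if i % d == 0:
--                 return False
--             d += 1
--         return i >= 2
--
--     out = []
--     for i in range(2, n + 1):
--         if is_prime(i) and i % 3 != 0:
--             out.append(i * i)
--     return out
-- ===== Notes on version B (the rewrite author's own statement) =====
-- stated objective: alternative
-- what changed: Replaces the Eratosthenes sieve table with per-number trial division (a while loop testing divisors d with d*d <= i), so no boolean array is built at all.
-- crash fix: For n <= 0 A raises IndexError when writing primes[0]/primes[1] into a too-short list; B returns []. — e.g. on generate_square_primes(0): A raises IndexError, B returns []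
import Mathlib
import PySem

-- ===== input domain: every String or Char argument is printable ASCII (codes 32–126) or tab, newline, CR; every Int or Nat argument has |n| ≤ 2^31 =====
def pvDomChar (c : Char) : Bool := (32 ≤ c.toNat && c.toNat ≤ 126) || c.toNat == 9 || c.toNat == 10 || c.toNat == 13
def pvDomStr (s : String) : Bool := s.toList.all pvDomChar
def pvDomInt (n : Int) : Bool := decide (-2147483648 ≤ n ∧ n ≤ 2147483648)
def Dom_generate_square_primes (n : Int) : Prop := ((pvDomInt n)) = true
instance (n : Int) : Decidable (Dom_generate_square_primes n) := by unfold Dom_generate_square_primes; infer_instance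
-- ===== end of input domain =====

-- B replaces A's Eratosthenes sieve table by per-number trial division; same cost class left honest in the claim (B is not faster).
-- A mutates no argument.  On n ≤ 0 Python A raises IndexError (see Pre_/Raises_ below).

-- ===== PORT A =====
-- inner loop 'for j in range(i*i, n+1, i): primes[j] = False'; the range' length is
-- the Python range length max(0, ceil(((n+1) - i*i) / i)), exact for 2 ≤ i.
def sieveInner (i N : Nat) (pr : List Bool) : List Bool :=
  (List.range' (i * i) ((N + 1 - i * i + (i - 1)) / i) i).foldl (fun p j => p.set j false) pr

-- one iteration of A's outer loop body: 'if primes[i]: <mark multiples>'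
def pySieveStep (N : Nat) (pr : List Bool) (i : Nat) : List Bool :=
  if pr.getD i false then sieveInner i N pr else pr

-- int(math.sqrt(n)) = Nat.sqrt n.toNat exactly for 0 ≤ n ≤ 2^31 (the Dom bound: no float rounding below 2^52).
-- Indices read/written are always in range under Pre_ (1 ≤ n), where Python A returns; List.getD/List.set are exact there.
def generate_square_primes (n : Int) : List Int :=
  let N := n.toNat
  let primes0 : List Bool := ((List.replicate (N + 1) true).set 0 false).set 1 false
  let primes := (List.range' 2 (Nat.sqrt N + 1 - 2)).foldl (pySieveStep N) primes0
  (List.range' 2 (N + 1 - 2)).foldl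
    (fun acc i => if primes.getD i false && decide (i % 3 ≠ 0) then acc ++ [(i : Int) ^ 2] else acc) []

-- ===== PORT B =====
-- Source B's while loop 'd = 2; while d*d <= i: ...', one recursive call per increment of d
def isPrimeAux (i d : Nat) : Bool :=
  if h : d * d ≤ i then
    (if i % d == 0 then false else isPrimeAux i (d + 1))
  else
    decide (2 ≤ i)
termination_by i + 1 - d
decreasing_by
  rcases Nat.eq_zero_or_pos d with h0 | h0
  · omega
  · have : d ≤ d * d := Nat.le_mul_of_pos_left d h0
    omega

def generate_square_primes_alt (n : Int) : List Int :=
  (List.range' 2 (n.toNat + 1 - 2)).foldl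
    (fun acc i => if isPrimeAux i 2 && decide (i % 3 ≠ 0) then acc ++ [(i : Int) * (i : Int)] else acc) []

-- ===== PRECONDITION & SPEC =====
-- Pre_ excludes exactly n ≤ 0, where A raises IndexError writing primes[0]/primes[1] into a list of length ≤ 1.
def Pre_generate_square_primes (n : Int) : Prop := 1 ≤ n
instance (n : Int) : Decidable (Pre_generate_square_primes n) := by unfold Pre_generate_square_primes; infer_instance
def pvWitness_generate_square_primes : Int := 10

-- For n ≤ 0 A raises IndexError; B returns [].
def Raises_generate_square_primes (n : Int) : Prop := n ≤ 0
instance (n : Int) : Decidable (Raises_generate_square_primes n) := by unfold Raises_generate_square_primes; infer_instance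
def pvRaiseWitness_generate_square_primes : Int := 0
def pvRaiseWitnessOut_generate_square_primes : List Int := []

def Spec_generate_square_primes (n : Int) (out : List Int) : Prop := out = generate_square_primes_alt n
instance (n : Int) (out : List Int) : Decidable (Spec_generate_square_primes n out) := by unfold Spec_generate_square_primes; infer_instance

-- ===== CLAIM (what is proved, stated in full; the proofs are below) =====
def Claim_equal_generate_square_primes : Prop := ∀ (n : Int), Dom_generate_square_primes n → Pre_generate_square_primes n → Spec_generate_square_primes n (generate_square_primes n)
def Claim_raises_generate_square_primes : Prop := (∀ (n : Int), Dom_generate_square_primes n → Raises_generate_square_primes n → ¬ Pre_generate_square_primes n) ∧ (Dom_generate_square_primes (pvRaiseWitness_generate_square_primes) ∧ Raises_generate_square_primes (pvRaiseWitness_generate_square_primes) ∧ generate_square_primes_alt (pvRaiseWitness_generate_square_primes) = pvRaiseWitnessOut_generate_square_primes)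

-- ===== LEMMAS AND PROOFS =====

-- "j is already crossed out after the outer loop has processed i = 2 .. k-1":
-- j ∈ {0,1} or j has some divisor d < k with d*d ≤ j (primality of d is not needed:
-- a composite witness d reduces to a prime one below it).
def Crossed (k j : Nat) : Prop := j ≤ 1 ∨ ∃ d, 2 ≤ d ∧ d < k ∧ d ∣ j ∧ d * d ≤ j

lemma length_foldl_set (L : List Nat) (pr : List Bool) :
    (L.foldl (fun p j => p.set j false) pr).length = pr.length := by
  induction L generalizing pr with
  | nil => rfl
  | cons a L ih => simpa [List.foldl] using ih (pr.set a false)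

lemma getD_foldl_set (L : List Nat) (pr : List Bool) (x : Nat) :
    (L.foldl (fun p j => p.set j false) pr).getD x false
      = if x ∈ L ∧ x < pr.length then false else pr.getD x false := by
  induction L generalizing pr with
  | nil => simp
  | cons a L ih =>
      have hget : (pr.set a false).getD x false
          = if x = a ∧ x < pr.length then false else pr.getD x false := by
        by_cases hxa : x = a
        · subst hxa
          by_cases hlt : x < pr.length
          · simp [List.getD, List.getElem?_set, hlt]
          · have h1 : pr[x]? = none := List.getElem?_eq_none (by omega)
            simp [List.getD, List.getElem?_set, hlt, h1]
        · have hax : ¬ a = x := fun h => hxa h.symm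
          simp [List.getD, List.getElem?_set, hax, hxa]
      rw [List.foldl_cons, ih, List.length_set, hget]
      simp only [List.mem_cons]
      split_ifs <;> tauto

lemma mem_sieveRange (i N j : Nat) (hi : 2 ≤ i) :
    j ∈ List.range' (i * i) ((N + 1 - i * i + (i - 1)) / i) i ↔ i ∣ j ∧ i * i ≤ j ∧ j ≤ N := by
  have hipos : 0 < i := by omega
  rw [List.mem_range']
  constructor
  · rintro ⟨t, ht, rfl⟩
    refine ⟨⟨i + t, by ring⟩, by omega, ?_⟩
    have h1 : (t + 1) * i ≤ (N + 1 - i * i + (i - 1)) / i * i :=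
      Nat.mul_le_mul ht (le_refl i)
    have h2 : (N + 1 - i * i + (i - 1)) / i * i ≤ N + 1 - i * i + (i - 1) :=
      Nat.div_mul_le_self _ _
    have h3 : (t + 1) * i = t * i + i := by ring
    have h4 : i * t = t * i := Nat.mul_comm i t
    by_cases hii : i * i ≤ N
    · omega
    · have h5 : N + 1 - i * i = 0 := by omega
      omega
  · rintro ⟨⟨m, rfl⟩, hle, hN⟩
    have him : i ≤ m := Nat.le_of_mul_le_mul_left hle hipos
    have hii : i * i ≤ N := le_trans hle hN
    have heq : i * (m - i) + i * i = i * m := by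
      rw [← Nat.mul_add]; congr 1; omega
    refine ⟨m - i, ?_, by omega⟩
    rw [Nat.lt_iff_add_one_le, Nat.le_div_iff_mul_le hipos]
    have h3 : (m - i) * i + i * i = m * i := by
      rw [← Nat.add_mul]; congr 1; omega
    have h4 : (m - i + 1) * i = (m - i) * i + i := by ring
    have h5 : i * m = m * i := Nat.mul_comm i m
    omega

lemma isPrimeAux_eq_true_iff (i d : Nat) :
    isPrimeAux i d = true ↔ (2 ≤ i ∧ ∀ e, d ≤ e → e * e ≤ i → i % e ≠ 0) := by
  fun_induction isPrimeAux i d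
  case case1 d h hmod =>
    simp only [beq_iff_eq] at hmod
    constructor
    · intro hf; exact absurd hf (by simp)
    · rintro ⟨-, hall⟩
      exact absurd (hall d le_rfl h) (by simp [hmod])
  case case2 d h hmod ih =>
    simp only [beq_iff_eq] at hmod
    rw [ih]
    constructor
    · rintro ⟨h2, hall⟩
      refine ⟨h2, fun e hde hei => ?_⟩
      rcases Nat.eq_or_lt_of_le hde with rfl | hlt
      · exact hmod
      · exact hall e hlt hei
    · rintro ⟨h2, hall⟩
      exact ⟨h2, fun e hde hei => hall e (by omega) hei⟩
  case case3 d h =>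
    simp only [decide_eq_true_eq]
    constructor
    · intro h2
      refine ⟨h2, fun e hde hei => ?_⟩
      exfalso
      have h3 : e * e < d * d := by omega
      have : e < d := by nlinarith
      omega
    · rintro ⟨h2, -⟩; exact h2

lemma getD_primes0 (N j : Nat) (hj : j ≤ N) (hN : 1 ≤ N) :
    (((List.replicate (N + 1) true).set 0 false).set 1 false).getD j false = !decide (j ≤ 1) := by
  match j with
  | 0 => simp [List.getD, List.getElem?_set]
  | 1 =>
      have h0 : 0 < N := hN
      simp [List.getD, List.getElem?_set, h0]
  | (k + 2) =>
      have h2 : k + 2 < N + 1 := by omega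
      simp [List.getD, List.getElem?_set, List.getElem?_replicate, h2]

-- the sieve invariant: after A's outer loop has processed i = 2 .. 2+m-1, entry j is
-- still true exactly when j is not yet crossed out
lemma sieve_inv (N : Nat) (hN : 1 ≤ N) (m : Nat) (hm : 2 + m ≤ Nat.sqrt N + 1) :
    ((List.range' 2 m).foldl (pySieveStep N)
        (((List.replicate (N + 1) true).set 0 false).set 1 false)).length = N + 1
    ∧ ∀ j, j ≤ N →
      (((List.range' 2 m).foldl (pySieveStep N)
          (((List.replicate (N + 1) true).set 0 false).set 1 false)).getD j false = true
        ↔ ¬ Crossed (2 + m) j) := by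
  induction m with
  | zero =>
      refine ⟨by simp, fun j hj => ?_⟩
      simp only [List.range']
      rw [List.foldl_nil, getD_primes0 N j hj hN]
      unfold Crossed
      simp only [Bool.not_eq_true', decide_eq_false_iff_not]
      constructor
      · intro h hc
        rcases hc with h1 | ⟨d, hd2, hdlt, -, -⟩
        · exact h h1
        · omega
      · exact fun h h1 => h (Or.inl h1)
  | succ m ih =>
      have hm' : 2 + m ≤ Nat.sqrt N + 1 := by omega
      obtain ⟨hlen, hinv⟩ := ih hm'
      have hi2 : 2 ≤ 2 + m := by omega
      have hiN : 2 + m ≤ N := by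
        have h1 : 2 + m ≤ Nat.sqrt N := by omega
        exact le_trans h1 (Nat.sqrt_le_self N)
      rw [List.range'_1_concat, List.foldl_append, List.foldl_cons, List.foldl_nil]
      set pr := (List.range' 2 m).foldl (pySieveStep N)
          (((List.replicate (N + 1) true).set 0 false).set 1 false) with hpr
      have hstep : 2 + (m + 1) = (2 + m) + 1 := by omega
      unfold pySieveStep
      by_cases hpi : pr.getD (2 + m) false
      · rw [if_pos hpi]
        have hci : ¬ Crossed (2 + m) (2 + m) := (hinv (2 + m) hiN).1 hpi
        refine ⟨by unfold sieveInner; rw [length_foldl_set]; exact hlen, fun j hj => ?_⟩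
        unfold sieveInner
        rw [getD_foldl_set, hlen, hstep]
        by_cases hmark : (2 + m) ∣ j ∧ (2 + m) * (2 + m) ≤ j ∧ j ≤ N
        · rw [if_pos ⟨(mem_sieveRange (2 + m) N j hi2).2 hmark, by omega⟩]
          have hc : Crossed ((2 + m) + 1) j :=
            Or.inr ⟨2 + m, hi2, by omega, hmark.1, hmark.2.1⟩
          simp [hc]
        · rw [if_neg (fun hcon => hmark ((mem_sieveRange (2 + m) N j hi2).1 hcon.1)), hinv j hj]
          constructor
          · intro h hc
            rcases hc with h1 | ⟨d, hd2, hdlt, hdvd, hsq⟩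
            · exact h (Or.inl h1)
            · rcases Nat.lt_or_ge d (2 + m) with hlt | hge
              · exact h (Or.inr ⟨d, hd2, hlt, hdvd, hsq⟩)
              · have hdeq : d = 2 + m := by omega
                subst hdeq
                exact hmark ⟨hdvd, hsq, hj⟩
          · intro h hc
            rcases hc with h1 | ⟨d, hd2, hdlt, hdvd, hsq⟩
            · exact h (Or.inl h1)
            · exact h (Or.inr ⟨d, hd2, by omega, hdvd, hsq⟩)
      · rw [if_neg hpi]
        refine ⟨hlen, fun j hj => ?_⟩
        rw [hinv j hj, hstep]
        have hci : Crossed (2 + m) (2 + m) := by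
          by_contra hc
          exact hpi ((hinv (2 + m) hiN).2 hc)
        rcases hci with h1 | ⟨d', hd2', hdlt', hdvd', hsq'⟩
        · omega
        · constructor
          · intro h hc
            rcases hc with h1 | ⟨d, hd2, hdlt, hdvd, hsq⟩
            · exact h (Or.inl h1)
            · rcases Nat.lt_or_ge d (2 + m) with hlt | hge
              · exact h (Or.inr ⟨d, hd2, hlt, hdvd, hsq⟩)
              · have hdeq : d = 2 + m := by omega
                subst hdeq
                have hle1 : d' * d' ≤ j := by
                  have h1 : 2 + m ≤ (2 + m) * (2 + m) := Nat.le_mul_of_pos_left _ (by omega)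
                  omega
                exact h (Or.inr ⟨d', hd2', by omega, dvd_trans hdvd' hdvd, hle1⟩)
          · intro h hc
            rcases hc with h1 | ⟨d, hd2, hdlt, hdvd, hsq⟩
            · exact h (Or.inl h1)
            · exact h (Or.inr ⟨d, hd2, by omega, hdvd, hsq⟩)

-- the sieve entry agrees with trial division on every 2 ≤ i ≤ N
lemma sieve_eq_trial (N : Nat) (hN : 1 ≤ N) (i : Nat) (h2 : 2 ≤ i) (hiN : i ≤ N) :
    ((List.range' 2 (Nat.sqrt N + 1 - 2)).foldl (pySieveStep N)
        (((List.replicate (N + 1) true).set 0 false).set 1 false)).getD i false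
      = isPrimeAux i 2 := by
  have hs1 : 1 ≤ Nat.sqrt N := Nat.le_sqrt.2 (by omega)
  have hm : 2 + (Nat.sqrt N + 1 - 2) = Nat.sqrt N + 1 := by omega
  obtain ⟨-, hinv⟩ := sieve_inv N hN (Nat.sqrt N + 1 - 2) (by omega)
  apply Bool.coe_iff_coe.mp
  rw [hinv i hiN, hm, isPrimeAux_eq_true_iff]
  unfold Crossed
  constructor
  · intro h
    refine ⟨h2, fun e he2 hei hmod => ?_⟩
    have hesq : e ≤ Nat.sqrt N := Nat.le_sqrt.2 (le_trans hei hiN)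
    exact h (Or.inr ⟨e, he2, by omega, (Nat.dvd_iff_mod_eq_zero).2 hmod, hei⟩)
  · rintro ⟨-, hall⟩ hc
    rcases hc with h1 | ⟨d, hd2, hdlt, hdvd, hsq⟩
    · omega
    · exact hall d hd2 hsq ((Nat.dvd_iff_mod_eq_zero).1 hdvd)

theorem generate_square_primes_spec : Claim_equal_generate_square_primes := by
  intro n _ hpre
  unfold Spec_generate_square_primes generate_square_primes generate_square_primes_alt
  have hN : 1 ≤ n.toNat := by
    unfold Pre_generate_square_primes at hpre
    omega
  apply List.foldl_ext
  intro acc i hi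
  rw [List.mem_range'_1] at hi
  have h2 : 2 ≤ i := hi.1
  have hiN : i ≤ n.toNat := by omega
  rw [sieve_eq_trial n.toNat hN i h2 hiN]
  rw [sq]

@[simp]
theorem generate_square_primes_raises : Claim_raises_generate_square_primes := by
  unfold Claim_raises_generate_square_primes
  constructor
  · intro n _ h hp
    unfold Raises_generate_square_primes at h
    unfold Pre_generate_square_primes at hp
    omega
  · refine ⟨by decide, by decide, by decide⟩
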